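-- pv_equiv track=rewrite | github.com/olumide-moore/Computational_Intelligence | Exp_study/main.py | get_shortages_excesses
-- ===== SOURCE A (Python) =====
-- requested_pieces= {3: 5, 4: 2, 5: 1, 6: 2, 7: 4, 8: 2, 9: 1, 10: 3}
--
-- def count_pieces_in_chromosome(chromosome):
--     '''This function counts the quantities of pieces in a chromosome'''
--     chromosome_pieces_count={}
--     for gene in chromosome:
--         for piece in gene:
--             chromosome_pieces_count[piece]=chromosome_pieces_count.get(piece,0)+1
--     return chromosome_pieces_count
--
-- def get_shortages_excesses(chromosome):
--     '''This function gets the surpluses of pieces in a chromosome'''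
--     chromosome_pieces_count=count_pieces_in_chromosome(chromosome)
--     shortages=[]
--     excesses=[]
--     for req_piece, req_count in requested_pieces.items():
--         count=chromosome_pieces_count.get(req_piece,0)
--         if count<req_count:
--             shortages.extend([req_piece]*(req_count-count))
--         elif count>req_count:
--             excesses.extend([req_piece]*(count-req_count))
--     return shortages, excesses
--
--     return surpluses
-- ===== SOURCE B (Python) =====
-- requested_pieces = {3: 5, 4: 2, 5: 1, 6: 2, 7: 4, 8: 2, 9: 1, 10: 3}
--
-- def get_shortages_excesses(chromosome):
--     # Streaming quota consumption: walk the pieces once, decrementing the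
--     # remaining quota of each requested piece; once a quota hits zero further
--     # occurrences are recorded as overflow. No total counts are ever computed.
--     remaining = dict(requested_pieces)
--     overflow = dict.fromkeys(requested_pieces, 0)
--     for gene in chromosome:
--         for piece in gene:
--             if piece in remaining:
--                 if remaining[piece] > 0:
--                     remaining[piece] -= 1
--                 else:
--                     overflow[piece] += 1
--     shortages = []
--     excesses = []
--     for p in requested_pieces:
--         shortages += [p] * remaining[p]
--         excesses += [p] * overflow[p]
--     return shortages, excesses
-- ===== Notes on version B (the rewrite author's own statement) =====
-- stated objective: alternative
-- what changed: B replaces A's count-then-compare (build a full count dict, then per requested key compare count with quota) by a single streaming pass that consumes quotas online: it decrements a remaining-quota dict as each piece streams by and records overflow the moment a quota is exhausted, so total counts are never computed; shortages are the leftover quotas, excesses the overflow tallies.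
import Mathlib
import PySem

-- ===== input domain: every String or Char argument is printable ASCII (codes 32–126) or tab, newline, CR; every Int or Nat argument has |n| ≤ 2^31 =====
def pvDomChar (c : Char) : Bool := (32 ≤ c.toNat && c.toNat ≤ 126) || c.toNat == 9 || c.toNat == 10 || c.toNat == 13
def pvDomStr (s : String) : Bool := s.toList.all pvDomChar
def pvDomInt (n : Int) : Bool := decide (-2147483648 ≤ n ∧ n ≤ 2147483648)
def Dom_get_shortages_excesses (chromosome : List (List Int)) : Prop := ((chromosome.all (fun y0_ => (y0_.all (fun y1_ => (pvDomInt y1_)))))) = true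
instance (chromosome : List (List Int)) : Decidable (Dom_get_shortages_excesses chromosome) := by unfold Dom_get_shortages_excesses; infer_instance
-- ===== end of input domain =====

-- B replaces A's count-then-compare with a single streaming pass that consumes quotas
-- online (remaining-quota dict decremented per piece, overflow recorded when exhausted);
-- objective: alternative algorithm of the same cost.


-- ===== PORT A =====
def requested_pieces : PySem.Dict Int Int :=
  PySem.Dict.ofList [(3, 5), (4, 2), (5, 1), (6, 2), (7, 4), (8, 2), (9, 1), (10, 3)]

def count_pieces_in_chromosome (chromosome : List (List Int)) : PySem.Dict Int Int :=
  chromosome.foldl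
    (fun d gene => gene.foldl (fun d piece => d.insert piece (d.getD piece 0 + 1)) d)
    PySem.Dict.empty

def get_shortages_excesses (chromosome : List (List Int)) : List Int × List Int :=
  let chromosome_pieces_count := count_pieces_in_chromosome chromosome
  let acc := requested_pieces.items.foldl
    (fun (acc : List Int × List Int) pr =>
      let count := chromosome_pieces_count.getD pr.1 0
      if count < pr.2 then
        (acc.1 ++ List.replicate (pr.2 - count).toNat pr.1, acc.2)
      else if count > pr.2 then
        (acc.1, acc.2 ++ List.replicate (count - pr.2).toNat pr.1)
      else acc)
    ([], [])
  (acc.1, acc.2)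

-- ===== PORT B =====
-- overflow = dict.fromkeys(requested_pieces, 0)
def pvOverflow0 : PySem.Dict Int Int :=
  requested_pieces.keys.foldl (fun d k => d.insert k 0) PySem.Dict.empty

-- the body of B's streaming loop: consume a quota if one is left, else record overflow
def pvStepB (st : PySem.Dict Int Int × PySem.Dict Int Int) (piece : Int) :
    PySem.Dict Int Int × PySem.Dict Int Int :=
  if st.1.contains piece then
    if st.1.getD piece 0 > 0 then (st.1.insert piece (st.1.getD piece 0 - 1), st.2)
    else (st.1, st.2.insert piece (st.2.getD piece 0 + 1))
  else st

def get_shortages_excesses_alt (chromosome : List (List Int)) : List Int × List Int :=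
  let st := chromosome.foldl (fun st gene => gene.foldl pvStepB st) (requested_pieces, pvOverflow0)
  let out := requested_pieces.keys.foldl
    (fun (acc : List Int × List Int) p =>
      (acc.1 ++ List.replicate (st.1.getD p 0).toNat p,
       acc.2 ++ List.replicate (st.2.getD p 0).toNat p))
    ([], [])
  (out.1, out.2)

-- ===== PRECONDITION & SPEC =====
def Spec_get_shortages_excesses (chromosome : List (List Int)) (out : List Int × List Int) : Prop := out = get_shortages_excesses_alt chromosome
instance (chromosome : List (List Int)) (out : List Int × List Int) : Decidable (Spec_get_shortages_excesses chromosome out) := by unfold Spec_get_shortages_excesses; infer_instance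

-- ===== CLAIM (what is proved, stated in full; the proofs are below) =====
def Claim_equal_get_shortages_excesses : Prop := ∀ (chromosome : List (List Int)), Dom_get_shortages_excesses chromosome → Spec_get_shortages_excesses chromosome (get_shortages_excesses chromosome)

-- ===== LEMMAS AND PROOFS =====

-- A's nested dict-building loop counts exactly like counting in the flattened list.
theorem count_pieces_getD (chromosome : List (List Int)) (p : Int) :
    (count_pieces_in_chromosome chromosome).getD p 0
      = ((chromosome.flatMap (fun gene => gene)).count p : Int) := by
  unfold count_pieces_in_chromosome
  induction chromosome using List.reverseRecOn with
  | nil => simp [PySem.Dict.getD_empty]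
  | append_singleton xs x ih =>
      rw [List.foldl_append]
      simp only [List.foldl_cons, List.foldl_nil]
      rw [PySem.Dict.getD_foldl_insert_add_one, ih]
      simp [List.count_append]

-- B's nested loop over genes is the loop over the flattened piece stream.
theorem foldl_flat (chromosome : List (List Int))
    (st0 : PySem.Dict Int Int × PySem.Dict Int Int) :
    chromosome.foldl (fun st gene => gene.foldl pvStepB st) st0
      = (chromosome.flatMap (fun gene => gene)).foldl pvStepB st0 := by
  induction chromosome generalizing st0 with
  | nil => rfl
  | cons g gs ih => simp [List.foldl_append, ih]

-- pvStepB unfolded at an application (rfl; lets rw unfold only the outer step)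
theorem pvStepB_def (st : PySem.Dict Int Int × PySem.Dict Int Int) (piece : Int) :
    pvStepB st piece =
      if st.1.contains piece then
        if st.1.getD piece 0 > 0 then (st.1.insert piece (st.1.getD piece 0 - 1), st.2)
        else (st.1, st.2.insert piece (st.2.getD piece 0 + 1))
      else st := rfl

-- dict.fromkeys(…, 0) reads 0 at every key.
theorem overflow0_getD (ks : List Int) (p : Int) :
    (ks.foldl (fun d k => d.insert k (0 : Int)) (PySem.Dict.empty : PySem.Dict Int Int)).getD p 0 = 0 := by
  induction ks using List.reverseRecOn with
  | nil => simp [PySem.Dict.getD_empty]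
  | append_singleton xs x ih =>
      rw [List.foldl_append]
      simp only [List.foldl_cons, List.foldl_nil]
      rw [PySem.Dict.getD_insert]
      split_ifs <;> simp [ih]

-- the remaining-quota dict keeps exactly the requested keys throughout the stream
theorem contains_inv (L : List Int) :
    ∀ q, (L.foldl pvStepB (requested_pieces, pvOverflow0)).1.contains q
      = requested_pieces.contains q := by
  induction L using List.reverseRecOn with
  | nil => intro q; rfl
  | append_singleton xs x ih =>
      intro q
      rw [List.foldl_append]
      simp only [List.foldl_cons, List.foldl_nil]
      rw [pvStepB_def]
      split_ifs with h1 h2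
      · rw [PySem.Dict.contains_insert, ih q]
        by_cases hq : q = x
        · subst hq
          have hc : requested_pieces.contains q = true := (ih q).symm.trans h1
          simp [hc]
        · simp [hq]
      · exact ih q
      · exact ih q

-- streaming invariant: after consuming the stream L, the remaining quota of a requested
-- piece p (quota r) is max(r - count, 0) and its overflow tally is max(count - r, 0).
theorem stream_inv (L : List Int) (p r : Int)
    (h : requested_pieces.get? p = some r) (hr : 0 ≤ r) :
    (L.foldl pvStepB (requested_pieces, pvOverflow0)).1.getD p 0 = max (r - L.count p) 0 ∧
    (L.foldl pvStepB (requested_pieces, pvOverflow0)).2.getD p 0 = max (L.count p - r) 0 := by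
  induction L using List.reverseRecOn with
  | nil =>
      constructor
      · rw [List.foldl_nil]
        show requested_pieces.getD p 0 = _
        rw [PySem.Dict.getD_eq_get?_getD, h]
        simp; omega
      · rw [List.foldl_nil]
        have h0 : pvOverflow0.getD p 0 = 0 := overflow0_getD requested_pieces.keys p
        show pvOverflow0.getD p 0 = _
        rw [h0]
        simp; omega
  | append_singleton xs x ih =>
      have hcp : requested_pieces.contains p = true := by
        rw [PySem.Dict.contains_eq_isSome_get?, h]; rfl
      rw [List.foldl_append]
      simp only [List.foldl_cons, List.foldl_nil]
      set st := xs.foldl pvStepB (requested_pieces, pvOverflow0) with hst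
      rw [pvStepB_def]
      by_cases hx : st.1.contains x
      · rw [if_pos hx]
        by_cases hpx : p = x
        · subst hpx
          obtain ⟨ihR, ihE⟩ := ih
          by_cases hpos : st.1.getD p 0 > 0
          · rw [if_pos hpos]
            rw [ihR] at hpos ⊢
            constructor
            · simp only [PySem.Dict.getD_insert_self]
              simp [List.count_append]; omega
            · rw [ihE]; simp [List.count_append]; omega
          · rw [if_neg hpos]
            rw [ihR] at hpos
            constructor
            · rw [ihR]; simp [List.count_append]; omega
            · simp only [PySem.Dict.getD_insert_self]
              rw [ihE]; simp [List.count_append]; omega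
        · obtain ⟨ihR, ihE⟩ := ih
          have hcx : List.count p [x] = 0 := by
            simp [Ne.symm hpx]
          have hcount : (xs ++ [x]).count p = xs.count p := by
            rw [List.count_append, hcx]; omega
          by_cases hpos : st.1.getD x 0 > 0
          · rw [if_pos hpos]
            constructor
            · rw [PySem.Dict.getD_insert, if_neg hpx, hcount]; exact ihR
            · rw [hcount]; exact ihE
          · rw [if_neg hpos]
            constructor
            · rw [hcount]; exact ihR
            · rw [PySem.Dict.getD_insert, if_neg hpx, hcount]; exact ihE
      · rw [if_neg hx]
        have hpx : p ≠ x := by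
          intro hpe; subst hpe
          rw [contains_inv xs p, hcp] at hx; exact hx rfl
        have hcx : List.count p [x] = 0 := by
          simp [Ne.symm hpx]
        have hcount : (xs ++ [x]).count p = xs.count p := by
          rw [List.count_append, hcx]; omega
        rw [hcount]; exact ih

-- generic output-phase equality: A's compare-and-extend over (key, quota) pairs equals
-- B's replicate-from-state over the keys, given the streaming invariant on each pair
theorem fold_out (prs : List (Int × Int)) (C R E : PySem.Dict Int Int)
    (h : ∀ pr ∈ prs, R.getD pr.1 0 = max (pr.2 - C.getD pr.1 0) 0 ∧
                     E.getD pr.1 0 = max (C.getD pr.1 0 - pr.2) 0)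
    (acc : List Int × List Int) :
    prs.foldl
      (fun (acc : List Int × List Int) pr =>
        if C.getD pr.1 0 < pr.2 then
          (acc.1 ++ List.replicate (pr.2 - C.getD pr.1 0).toNat pr.1, acc.2)
        else if C.getD pr.1 0 > pr.2 then
          (acc.1, acc.2 ++ List.replicate (C.getD pr.1 0 - pr.2).toNat pr.1)
        else acc) acc
    = (prs.map (·.1)).foldl
      (fun (acc : List Int × List Int) p =>
        (acc.1 ++ List.replicate (R.getD p 0).toNat p,
         acc.2 ++ List.replicate (E.getD p 0).toNat p)) acc := by
  induction prs generalizing acc with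
  | nil => rfl
  | cons pr rest ih =>
      simp only [List.map_cons, List.foldl_cons]
      obtain ⟨hR, hE⟩ := h pr (by simp)
      rw [hR, hE]
      have ih' := ih (fun q hq => h q (by simp [hq]))
      set c := C.getD pr.1 0 with hc
      by_cases h1 : c < pr.2
      · rw [if_pos h1]
        have e1 : (max (pr.2 - c) 0).toNat = (pr.2 - c).toNat := by omega
        have e2 : (max (c - pr.2) 0).toNat = 0 := by omega
        rw [e1, e2]
        simp only [List.replicate_zero, List.append_nil]
        exact ih' _
      · rw [if_neg h1]
        by_cases h2 : c > pr.2
        · rw [if_pos h2]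
          have e1 : (max (pr.2 - c) 0).toNat = 0 := by omega
          have e2 : (max (c - pr.2) 0).toNat = (c - pr.2).toNat := by omega
          rw [e1, e2]
          simp only [List.replicate_zero, List.append_nil]
          exact ih' _
        · rw [if_neg h2]
          have e1 : (max (pr.2 - c) 0).toNat = 0 := by omega
          have e2 : (max (c - pr.2) 0).toNat = 0 := by omega
          rw [e1, e2]
          simp only [List.replicate_zero, List.append_nil]
          exact ih' _

-- ===== VERDICT (by name: the statement is the Claim_ definition above) =====
theorem get_shortages_excesses_spec : Claim_equal_get_shortages_excesses := by
  intro chromosome _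
  unfold Spec_get_shortages_excesses
  show get_shortages_excesses chromosome = get_shortages_excesses_alt chromosome
  simp only [get_shortages_excesses, get_shortages_excesses_alt]
  rw [foldl_flat]
  set pieces := chromosome.flatMap (fun gene => gene) with hp
  set st := pieces.foldl pvStepB (requested_pieces, pvOverflow0) with hst
  have hkeys : requested_pieces.keys = requested_pieces.items.map (·.1) := rfl
  rw [hkeys]
  have hmem : ∀ pr ∈ requested_pieces.items,
      requested_pieces.get? pr.1 = some pr.2 ∧ 0 ≤ pr.2 := by decide
  have h : ∀ pr ∈ requested_pieces.items,
      st.1.getD pr.1 0 = max (pr.2 - (count_pieces_in_chromosome chromosome).getD pr.1 0) 0 ∧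
      st.2.getD pr.1 0 = max ((count_pieces_in_chromosome chromosome).getD pr.1 0 - pr.2) 0 := by
    intro pr hpr
    obtain ⟨hg, hr⟩ := hmem pr hpr
    rw [count_pieces_getD, ← hp]
    exact stream_inv pieces pr.1 pr.2 hg hr
  rw [fold_out requested_pieces.items (count_pieces_in_chromosome chromosome) st.1 st.2 h]
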